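-- pv_equiv track=rewrite | github.com/soimort/you-get | src/you_get/processor/join_mp4.py | merge_stsc
-- ===== SOURCE A (Python) =====
-- def merge_stsc(chunks_list, total_chunk_number_list):
--     results = []
--     chunk_index = 1
--     for chunks, total in zip(chunks_list, total_chunk_number_list):
--         for i in range(len(chunks)):
--             if i < len(chunks) - 1:
--                 chunk_number = chunks[i + 1][0] - chunks[i][0]
--             else:
--                 chunk_number = total + 1 - chunks[i][0]
--             sample_number = chunks[i][1]
--             description = chunks[i][2]
--             results.append((chunk_index, sample_number, description))
--             chunk_index += chunk_number
--     return results
-- ===== SOURCE B (Python) =====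
-- def merge_stsc(chunks_list, total_chunk_number_list):
--     # Telescoping closed form: within a group the running chunk_index reduces to
--     # base + (start - first_start); the group advances base by total + 1 - first_start.
--     results = []
--     base = 1
--     for chunks, total in zip(chunks_list, total_chunk_number_list):
--         if chunks:
--             first = chunks[0][0]
--             results.extend((base + start - first, sample, desc)
--                            for start, sample, desc in chunks)
--             base += total + 1 - first
--     return results
-- ===== Notes on version B (the rewrite author's own statement) =====
-- stated objective: simpler
-- what changed: Replaces the per-entry delta computation and running sum by a telescoped closed form: each entry's chunk_index is base + (start - first_start) of its group, computed directly, and base advances once per group by total + 1 - first_start; no next-minus-current deltas, no sentinel, no inner accumulator.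
import Mathlib
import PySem

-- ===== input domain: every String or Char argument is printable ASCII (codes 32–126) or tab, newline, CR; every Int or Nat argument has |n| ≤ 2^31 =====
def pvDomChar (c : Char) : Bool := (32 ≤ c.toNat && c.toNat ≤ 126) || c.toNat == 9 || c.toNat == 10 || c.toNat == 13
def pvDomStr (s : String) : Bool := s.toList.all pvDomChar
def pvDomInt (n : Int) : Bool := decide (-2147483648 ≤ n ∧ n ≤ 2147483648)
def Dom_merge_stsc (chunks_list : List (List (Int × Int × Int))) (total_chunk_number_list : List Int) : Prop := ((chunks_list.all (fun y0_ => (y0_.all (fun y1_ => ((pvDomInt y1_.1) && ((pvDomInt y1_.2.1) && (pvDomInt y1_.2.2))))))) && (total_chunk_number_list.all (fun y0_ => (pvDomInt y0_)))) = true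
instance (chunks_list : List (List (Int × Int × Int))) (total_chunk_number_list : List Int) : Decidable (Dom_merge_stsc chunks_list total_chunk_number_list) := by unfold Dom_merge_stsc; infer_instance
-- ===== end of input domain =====

-- B drops A's per-entry delta + running sum: the sum telescopes, so each entry's
-- chunk_index is base + (start - first_start) computed directly per group; same cost.

-- ===== PORT A =====
-- A's inner 'for i in range(len(chunks))' body; all indices are in range so getD
-- with a dummy default is exact, and Nat 'i < len - 1' agrees with Python's test.
def mergeA_step (chunks : List (Int × Int × Int)) (total : Int)
    (st : List (Int × Int × Int) × Int) (i : Nat) : List (Int × Int × Int) × Int :=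
  let chunk_number :=
    if i < chunks.length - 1 then
      (chunks.getD (i + 1) (0, 0, 0)).1 - (chunks.getD i (0, 0, 0)).1
    else
      total + 1 - (chunks.getD i (0, 0, 0)).1
  let sample_number := (chunks.getD i (0, 0, 0)).2.1
  let description := (chunks.getD i (0, 0, 0)).2.2
  (st.1 ++ [(st.2, sample_number, description)], st.2 + chunk_number)

def merge_stsc (chunks_list : List (List (Int × Int × Int))) (total_chunk_number_list : List Int) : List (Int × Int × Int) :=
  ((chunks_list.zip total_chunk_number_list).foldl
    (fun st p => (List.range p.1.length).foldl (mergeA_step p.1 p.2) st)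
    ([], 1)).1

-- ===== PORT B =====
-- state = (results, base); per nonempty group: extend with the offset formula,
-- advance base once by total + 1 - first
def merge_stsc_alt (chunks_list : List (List (Int × Int × Int))) (total_chunk_number_list : List Int) : List (Int × Int × Int) :=
  ((chunks_list.zip total_chunk_number_list).foldl
    (fun st p =>
      match p.1 with
      | [] => st
      | c :: _ =>
        (st.1 ++ p.1.map (fun e => (st.2 + e.1 - c.1, e.2.1, e.2.2)),
         st.2 + (p.2 + 1 - c.1)))
    ([], 1)).1

-- ===== PRECONDITION & SPEC =====
def Spec_merge_stsc (chunks_list : List (List (Int × Int × Int))) (total_chunk_number_list : List Int) (out : List (Int × Int × Int)) : Prop := out = merge_stsc_alt chunks_list total_chunk_number_list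
instance (chunks_list : List (List (Int × Int × Int))) (total_chunk_number_list : List Int) (out : List (Int × Int × Int)) : Decidable (Spec_merge_stsc chunks_list total_chunk_number_list out) := by unfold Spec_merge_stsc; infer_instance

-- ===== CLAIM (what is proved, stated in full; the proofs are below) =====
def Claim_equal_merge_stsc : Prop := ∀ (chunks_list : List (List (Int × Int × Int))) (total_chunk_number_list : List Int), Dom_merge_stsc chunks_list total_chunk_number_list → Spec_merge_stsc chunks_list total_chunk_number_list (merge_stsc chunks_list total_chunk_number_list)

-- ===== LEMMAS AND PROOFS =====

-- proof-side helpers characterising A's inner loop: the per-entry deltas of one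
-- group, and the append/accumulate step they drive
def triplesOf (chunks : List (Int × Int × Int)) (total : Int) : List (Int × Int × Int) :=
  match chunks with
  | [] => []
  | c :: cs =>
    ((match cs with | [] => total + 1 | d :: _ => d.1) - c.1, c.2.1, c.2.2) :: triplesOf cs total

def scanStep (st : List (Int × Int × Int) × Int) (t : Int × Int × Int) : List (Int × Int × Int) × Int :=
  (st.1 ++ [(st.2, t.2.1, t.2.2)], st.2 + t.1)

lemma innerA_eq_scan (chunks : List (Int × Int × Int)) (total : Int)
    (st : List (Int × Int × Int) × Int) :
    (List.range chunks.length).foldl (mergeA_step chunks total) st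
      = (triplesOf chunks total).foldl scanStep st := by
  induction chunks generalizing st with
  | nil => simp [triplesOf]
  | cons c cs ih =>
    have hr : List.range (c :: cs).length = 0 :: (List.range cs.length).map Nat.succ := by
      simp [List.range_succ_eq_map]
    rw [hr]
    simp only [List.foldl_cons, List.foldl_map]
    have hshift :
        (List.range cs.length).foldl
            (fun s i => mergeA_step (c :: cs) total s (Nat.succ i)) (mergeA_step (c :: cs) total st 0)
          = (List.range cs.length).foldl (mergeA_step cs total) (mergeA_step (c :: cs) total st 0) := by
      apply PySem.List.foldl_congr_mem
      intro s i hi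
      have hilt : i < cs.length := List.mem_range.mp hi
      simp only [mergeA_step, List.getD_cons_succ, List.length_cons]
      split_ifs with h1 h2 <;> first | rfl | omega
    rw [hshift, ih]
    clear hshift hr ih
    cases cs with
    | nil => simp [triplesOf, mergeA_step, scanStep]
    | cons d ds =>
      simp only [triplesOf, List.foldl_cons]
      congr 1

-- the telescoping lemma: running the delta scan over one group's triples from
-- (acc, idx) yields exactly B's offset-formula extension and base advance
lemma scan_triples_telescope (c : Int × Int × Int) (cs : List (Int × Int × Int)) (total : Int)
    (acc : List (Int × Int × Int)) (idx : Int) :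
    (triplesOf (c :: cs) total).foldl scanStep (acc, idx)
      = (acc ++ (c :: cs).map (fun e => (idx + e.1 - c.1, e.2.1, e.2.2)),
         idx + (total + 1 - c.1)) := by
  induction cs generalizing c acc idx with
  | nil =>
    simp [triplesOf, scanStep, add_sub_cancel_right]
  | cons d ds ih =>
    simp only [triplesOf, List.foldl_cons, scanStep]
    have hrec := ih d (acc ++ [(idx, c.2.1, c.2.2)]) (idx + (d.1 - c.1))
    simp only [triplesOf, List.foldl_cons, scanStep] at hrec
    rw [hrec]
    have hmap : List.map (fun e => (idx + (d.1 - c.1) + e.1 - d.1, e.2.1, e.2.2)) (d :: ds)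
        = List.map (fun e => (idx + e.1 - c.1, e.2.1, e.2.2)) (d :: ds) :=
      List.map_congr_left (fun e _ => by
        have h : idx + (d.1 - c.1) + e.1 - d.1 = idx + e.1 - c.1 := by ring
        rw [h])
    rw [hmap]
    simp only [Prod.mk.injEq]
    constructor
    · simp [List.append_assoc, add_sub_cancel_right]
    · ring

-- ===== VERDICT (by name: the statement is the Claim_ definition above) =====
theorem merge_stsc_spec : Claim_equal_merge_stsc := by
  intro cl tl _
  unfold Spec_merge_stsc merge_stsc merge_stsc_alt
  congr 1
  apply PySem.List.foldl_congr_mem  -- pointwise equality of the two outer steps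
  intro st p _
  rw [innerA_eq_scan]
  obtain ⟨acc, idx⟩ := st
  obtain ⟨chunks, total⟩ := p
  cases chunks with
  | nil => simp [triplesOf]
  | cons c cs => exact scan_triples_telescope c cs total acc idx
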